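-- pv_equiv track=rewrite | github.com/ANONHALO/codingTest_study | acmicpc/BasicMathematics/acmicpc-2609.py | GCF
-- ===== SOURCE A (Python) =====
-- import copy
--
-- def GCF(aa, bb):
--   at = copy.deepcopy(aa)
--   bt = copy.deepcopy(bb)
--   common = 1
--   while at and bt:
--     if at[0] == bt[0]:
--       common = common * at[0]
--       del at[0]
--       del bt[0]
--     elif at[0] > bt[0]:
--       del bt[0]
--     else:
--       del at[0]
--   return common
-- ===== SOURCE B (Python) =====
-- def GCF(aa, bb):
--     i = 0
--     j = 0
--     common = 1
--     n = len(aa)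
--     m = len(bb)
--     while i < n and j < m:
--         x = aa[i]
--         y = bb[j]
--         if x == y:
--             common = common * x
--             i += 1
--             j += 1
--         elif x > y:
--             j += 1
--         else:
--             i += 1
--     return common
-- ===== Notes on version B (the rewrite author's own statement) =====
-- stated objective: faster
-- what changed: Replaces A's destructive front-deletion on deep copies of both lists with an index-based two-pointer scan over the original lists, so no copying and no O(n) del-from-front operations.
import Mathlib
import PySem

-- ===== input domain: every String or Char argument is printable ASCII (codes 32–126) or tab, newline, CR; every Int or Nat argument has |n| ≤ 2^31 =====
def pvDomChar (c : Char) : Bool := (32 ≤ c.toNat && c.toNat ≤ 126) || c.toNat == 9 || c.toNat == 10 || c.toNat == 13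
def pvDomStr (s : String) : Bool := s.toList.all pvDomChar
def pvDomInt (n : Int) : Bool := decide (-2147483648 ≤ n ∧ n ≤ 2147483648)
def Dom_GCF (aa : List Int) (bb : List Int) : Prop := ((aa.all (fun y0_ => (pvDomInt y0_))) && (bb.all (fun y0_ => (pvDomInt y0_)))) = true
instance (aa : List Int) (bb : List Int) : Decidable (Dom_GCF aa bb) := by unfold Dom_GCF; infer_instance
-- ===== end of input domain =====

-- B replaces A's front-deletion on copied lists with an index-based two-pointer scan (no copies, no deletions); faster asymptotically.

-- ===== PORT A =====
-- A's while-loop: heads compared, matching head multiplied into common, front elements deleted.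
def GCFloop : List Int → List Int → Int → Int
  | a :: at_, b :: bt, common =>
    if a == b then GCFloop at_ bt (common * a)
    else if a > b then GCFloop (a :: at_) bt common
    else GCFloop at_ (b :: bt) common
  | _, _, common => common
termination_by at_ bt _ => at_.length + bt.length

def GCF (aa : List Int) (bb : List Int) : Int :=
  -- at = deepcopy(aa), bt = deepcopy(bb): copies of immutable-int lists, value-identical
  GCFloop aa bb 1

-- ===== PORT B =====
-- B's while-loop: two indices i, j advance over the unchanged lists.
def GCFaltLoop (aa bb : List Int) (i j : Nat) (common : Int) : Int :=
  if h : i < aa.length ∧ j < bb.length then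
    if aa[i]'h.1 == bb[j]'h.2 then GCFaltLoop aa bb (i+1) (j+1) (common * (aa[i]'h.1))
    else if (aa[i]'h.1) > (bb[j]'h.2) then GCFaltLoop aa bb i (j+1) common
    else GCFaltLoop aa bb (i+1) j common
  else common
termination_by (aa.length - i) + (bb.length - j)
decreasing_by all_goals omega

def GCF_alt (aa : List Int) (bb : List Int) : Int :=
  GCFaltLoop aa bb 0 0 1

-- ===== PRECONDITION & SPEC =====
def Spec_GCF (aa : List Int) (bb : List Int) (out : Int) : Prop := out = GCF_alt aa bb
instance (aa : List Int) (bb : List Int) (out : Int) : Decidable (Spec_GCF aa bb out) := by unfold Spec_GCF; infer_instance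

-- ===== CLAIM (what is proved, stated in full; the proofs are below) =====
def Claim_equal_GCF : Prop := ∀ (aa : List Int) (bb : List Int), Dom_GCF aa bb → Spec_GCF aa bb (GCF aa bb)

-- ===== LEMMAS AND PROOFS =====
theorem GCFloop_nil_left (l : List Int) (c : Int) : GCFloop [] l c = c := by rw [GCFloop.eq_def]

theorem GCFloop_nil_right (a : Int) (l : List Int) (c : Int) : GCFloop (a :: l) [] c = c := by rw [GCFloop.eq_def]

-- B's index loop at (i, j) computes A's list loop on the suffixes from i and j.
theorem GCFaltLoop_eq_drop (aa bb : List Int) (i j : Nat) (common : Int) :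
    GCFaltLoop aa bb i j common = GCFloop (aa.drop i) (bb.drop j) common := by
  rw [GCFaltLoop]
  split
  · rename_i h
    have ha : aa.drop i = aa[i]'h.1 :: aa.drop (i+1) := List.drop_eq_getElem_cons h.1
    have hb : bb.drop j = bb[j]'h.2 :: bb.drop (j+1) := List.drop_eq_getElem_cons h.2
    rw [ha, hb, GCFloop]
    split
    · rw [GCFaltLoop_eq_drop aa bb (i+1) (j+1)]
    · split
      · rw [GCFaltLoop_eq_drop aa bb i (j+1) common, ha]
      · rw [GCFaltLoop_eq_drop aa bb (i+1) j common, hb]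
  · rename_i h
    rcases Nat.lt_or_ge i aa.length with hi | hi
    · have hj : bb.length ≤ j := by omega
      rw [List.drop_eq_nil_of_le hj]
      rw [List.drop_eq_getElem_cons hi, GCFloop_nil_right]
    · rw [List.drop_eq_nil_of_le hi, GCFloop_nil_left]
termination_by (aa.length - i) + (bb.length - j)
decreasing_by all_goals omega

-- ===== VERDICT (by name: the statement is the Claim_ definition above) =====
theorem GCF_spec : Claim_equal_GCF := by
  intro aa bb _
  unfold Spec_GCF GCF GCF_alt
  rw [GCFaltLoop_eq_drop]
  simp
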